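-- pv_equiv track=rewrite | github.com/JosephsDeadish/Panda-Sorter-Converter-Upscaler-background-remover-and-line-art-too | src/utils/image_processing.py | _nearest_power_of_2
-- ===== SOURCE A (Python) =====
-- def _nearest_power_of_2(value: int, max_value: int) -> int:
--     """Find nearest power of 2 within max value."""
--     power = 1
--     while power < value and power < max_value:
--         power *= 2
--
--     # Choose between current and previous power based on proximity
--     if power > value and power > 1:
--         prev_power = power // 2
--         if (value - prev_power) < (power - value):
--             return prev_power
--
--     return min(power, max_value)
-- ===== SOURCE B (Python) =====
-- def _nearest_power_of_2(value: int, max_value: int) -> int: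
--     """Find nearest power of 2 within max value (closed form via bit_length, no loop)."""
--     t = min(value, max_value)
--     power = 1 if t <= 1 else 1 << (t - 1).bit_length()
--     if power > value and power > 1:
--         prev_power = power // 2
--         if (value - prev_power) < (power - value):
--             return prev_power
--     return min(power, max_value)
-- ===== Notes on version B (the rewrite author's own statement) =====
-- stated objective: faster
-- what changed: Replaced the doubling while-loop by a closed-form computation: the post-loop power is derived directly as 1 << (min(value,max_value)-1).bit_length(), then the same proximity/cap decision is applied.
import Mathlib
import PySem

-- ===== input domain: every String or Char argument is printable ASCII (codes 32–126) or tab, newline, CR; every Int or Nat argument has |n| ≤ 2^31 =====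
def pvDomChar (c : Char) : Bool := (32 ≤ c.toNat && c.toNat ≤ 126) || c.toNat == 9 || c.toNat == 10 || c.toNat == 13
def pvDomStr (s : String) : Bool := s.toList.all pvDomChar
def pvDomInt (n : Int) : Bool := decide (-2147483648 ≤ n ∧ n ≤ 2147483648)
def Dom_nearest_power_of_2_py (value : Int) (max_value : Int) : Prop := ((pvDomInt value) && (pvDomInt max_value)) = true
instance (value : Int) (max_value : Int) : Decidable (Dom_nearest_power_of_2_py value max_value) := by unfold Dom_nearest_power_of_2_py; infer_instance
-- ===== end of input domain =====

-- B replaces A's doubling while-loop by a closed-form bit_length computation (constant-time).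

-- ===== PORT A =====
-- the while-loop of A: 'while power < value and power < max_value: power *= 2'
-- (hp keeps the loop invariant 1 ≤ power, needed only for termination)
def pyLoopA (value : Int) (max_value : Int) (power : Int) (hp : 1 ≤ power) : Int :=
  if h : power < value ∧ power < max_value then
    pyLoopA value max_value (power * 2) (by omega)
  else power
termination_by (min value max_value - power).toNat
decreasing_by omega

def nearest_power_of_2_py (value : Int) (max_value : Int) : Int :=
  let power := pyLoopA value max_value 1 (le_refl 1)
  if power > value ∧ power > 1 then
    let prev_power := PySem.Int.floordiv power 2
    if value - prev_power < power - value then prev_power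
    else min power max_value
  else min power max_value

-- ===== PORT B =====
-- '1 << (t-1).bit_length()' is ported as 2 ^ PySem.Int.bitLength (t-1): exact, the shift count is a non-negative bit length
def nearest_power_of_2_py_alt (value : Int) (max_value : Int) : Int :=
  let t := min value max_value
  let power : Int := if t ≤ 1 then 1 else 2 ^ PySem.Int.bitLength (t - 1)
  if power > value ∧ power > 1 then
    let prev_power := PySem.Int.floordiv power 2
    if value - prev_power < power - value then prev_power
    else min power max_value
  else min power max_value

-- ===== PRECONDITION & SPEC =====
def Spec_nearest_power_of_2_py (value : Int) (max_value : Int) (out : Int) : Prop := out = nearest_power_of_2_py_alt value max_value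
instance (value : Int) (max_value : Int) (out : Int) : Decidable (Spec_nearest_power_of_2_py value max_value out) := by unfold Spec_nearest_power_of_2_py; infer_instance

-- ===== CLAIM (what is proved, stated in full; the proofs are below) =====
def Claim_equal_nearest_power_of_2_py : Prop := ∀ (value : Int) (max_value : Int), Dom_nearest_power_of_2_py value max_value → Spec_nearest_power_of_2_py value max_value (nearest_power_of_2_py value max_value)

-- ===== LEMMAS AND PROOFS =====

-- bit_length characterisation: if 2^j ≤ n < 2^(j+1) then bit_length n = j+1
theorem bitLength_eq_of_bounds (n : Int) (j : Nat)
    (h1 : (2:Int) ^ j ≤ n) (h2 : n < (2:Int) ^ (j + 1)) :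
    PySem.Int.bitLength n = j + 1 := by
  have hpos : (0:Int) < 2 ^ j := by positivity
  have hne : n ≠ 0 := by omega
  have hA := PySem.Int.lt_two_pow_bitLength n
  have hB := PySem.Int.two_pow_bitLength_le n hne
  set L := PySem.Int.bitLength n with hL
  have hcast1 : ((2 ^ j : Nat) : Int) = (2:Int) ^ j := by push_cast; ring
  have hcast2 : ((2 ^ (j+1) : Nat) : Int) = (2:Int) ^ (j+1) := by push_cast; ring
  have h1' : (2 ^ j : Nat) ≤ n.natAbs := by omega
  have h2' : n.natAbs < 2 ^ (j+1) := by omega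
  by_contra hne'
  rcases Nat.lt_or_ge L (j+1) with hlt | hge
  · have : (2:Nat) ^ L ≤ 2 ^ j := Nat.pow_le_pow_right (by norm_num) (by omega)
    omega
  · have hge' : j + 2 ≤ L := by omega
    have : (2:Nat) ^ (j+1) ≤ 2 ^ (L-1) := Nat.pow_le_pow_right (by norm_num) (by omega)
    omega

-- the loop, started at a power of two below min value max_value, ends at 2^bit_length(min-1)
theorem loop_pow (value : Int) (max_value : Int) (j : Nat)
    (hj : (2:Int) ^ j < min value max_value) :
    pyLoopA value max_value ((2:Int) ^ j) (by have := pow_pos (by norm_num : (0:Int) < 2) j; omega) =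
      2 ^ PySem.Int.bitLength (min value max_value - 1) := by
  have hcond : (2:Int) ^ j < value ∧ (2:Int) ^ j < max_value := by
    constructor <;> omega
  rw [pyLoopA]
  simp only [hcond, and_self, dif_pos]
  have hstep : (2:Int) ^ j * 2 = 2 ^ (j + 1) := by ring
  by_cases h2 : (2:Int) ^ (j + 1) < min value max_value
  · have := loop_pow value max_value (j + 1) h2
    rw [← this]
    congr 1
  · -- loop stops at 2^(j+1); show bit_length (min - 1) = j + 1
    have hb : PySem.Int.bitLength (min value max_value - 1) = j + 1 := by
      apply bitLength_eq_of_bounds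
      · omega
      · omega
    have hstop : ¬ ((2:Int) ^ j * 2 < value ∧ (2:Int) ^ j * 2 < max_value) := by
      rw [hstep]; omega
    rw [pyLoopA, dif_neg hstop, hstep, hb]
termination_by (min value max_value - 2 ^ j).toNat
decreasing_by
  have : (2:Int) ^ j < 2 ^ (j + 1) := by
    have : (0:Int) < 2 ^ j := by positivity
    calc (2:Int) ^ j < 2 ^ j * 2 := by omega
    _ = 2 ^ (j+1) := by ring
  omega

-- the loop from 1 equals B's closed-form power
theorem loop_closed_form (value : Int) (max_value : Int) :
    pyLoopA value max_value 1 (le_refl 1) =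
      (if min value max_value ≤ 1 then (1:Int)
       else 2 ^ PySem.Int.bitLength (min value max_value - 1)) := by
  by_cases ht : min value max_value ≤ 1
  · rw [pyLoopA]
    have : ¬ ((1:Int) < value ∧ (1:Int) < max_value) := by omega
    simp [this, ht]
  · have h0 : (2:Int) ^ 0 < min value max_value := by norm_num; omega
    have := loop_pow value max_value 0 h0
    simp only [pow_zero] at this
    simp [ht, this]

-- ===== VERDICT (by name: the statement is the Claim_ definition above) =====
theorem nearest_power_of_2_py_spec : Claim_equal_nearest_power_of_2_py := by
  intro value max_value _
  unfold Spec_nearest_power_of_2_py nearest_power_of_2_py nearest_power_of_2_py_alt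
  rw [loop_closed_form]
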